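-- pv_equiv track=rewrite | github.com/LLafforgue/P42 | exam/rev_matrice.py | rev_matrice
-- ===== SOURCE A (Python) =====
-- def rev_matrice(arr: list[list[int]]) -> list[list[int]]:
-- 	rev = []
-- 	arr_rev = []
-- 	for r in arr:
-- 		rev.append(r[::-1])
-- 	i = len(rev) - 1
-- 	for r in rev:
-- 		arr_rev.append(rev[i])
-- 		i -= 1
-- 	return (arr_rev)
-- ===== SOURCE B (Python) =====
-- def rev_matrice(arr: list[list[int]]) -> list[list[int]]:
-- 	# Single pass, building everything back-to-front by prepending:
-- 	# each element is pushed onto the front of its new row, and each new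
-- 	# row is pushed onto the front of the output, so no slicing, no
-- 	# intermediate list and no index arithmetic are needed.
-- 	out = []
-- 	for row in arr:
-- 		rev_row = []
-- 		for x in row:
-- 			rev_row = [x] + rev_row
-- 		out = [rev_row] + out
-- 	return out
-- ===== Notes on version B (the rewrite author's own statement) =====
-- stated objective: alternative
-- what changed: Replaced A's two staged passes (build an intermediate list of slice-reversed rows, then copy it out with a manually decremented index) by a single pass that constructs the output back-to-front with prepend accumulators: each element is pushed onto the front of its new row and each finished row onto the front of the output, with no slicing, no intermediate list and no index arithmetic; it trades speed for this, since Python list prepending copies.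
import Mathlib
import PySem

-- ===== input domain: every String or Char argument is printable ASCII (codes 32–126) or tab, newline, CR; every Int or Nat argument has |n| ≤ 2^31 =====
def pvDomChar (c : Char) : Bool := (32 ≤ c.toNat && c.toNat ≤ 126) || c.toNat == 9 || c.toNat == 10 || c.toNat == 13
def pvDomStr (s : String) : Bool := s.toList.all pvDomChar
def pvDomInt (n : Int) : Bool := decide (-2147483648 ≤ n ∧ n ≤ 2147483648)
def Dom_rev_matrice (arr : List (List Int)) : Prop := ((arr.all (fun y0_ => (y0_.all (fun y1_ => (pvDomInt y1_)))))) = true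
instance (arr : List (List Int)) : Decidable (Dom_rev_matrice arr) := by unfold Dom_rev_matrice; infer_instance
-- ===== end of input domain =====

-- B replaces A's two staged passes (intermediate slice-reversed list + decrementing-index copy) by one
-- back-to-front pass with prepend accumulators (no slicing, no index arithmetic); objective: alternative.

-- ===== PORT A =====
def rev_matrice (arr : List (List Int)) : List (List Int) :=
  -- rev = []; for r in arr: rev.append(r[::-1])
  let rev := arr.foldl (fun acc r => acc ++ [(PySem.List.slice? r none none (-1)).getD []]) []
  -- i = len(rev)-1; arr_rev = []; for r in rev: arr_rev.append(rev[i]); i -= 1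
  let st := rev.foldl
    (fun (s : Int × List (List Int)) _r => (s.1 - 1, s.2 ++ [PySem.List.pyGetD rev s.1 []]))
    ((rev.length : Int) - 1, [])
  st.2

-- ===== PORT B =====
def rev_matrice_alt (arr : List (List Int)) : List (List Int) :=
  arr.foldl (fun out row => (row.foldl (fun rev_row x => x :: rev_row) []) :: out) []

-- ===== PRECONDITION & SPEC =====
def Spec_rev_matrice (arr : List (List Int)) (out : List (List Int)) : Prop := out = rev_matrice_alt arr
instance (arr : List (List Int)) (out : List (List Int)) : Decidable (Spec_rev_matrice arr out) := by unfold Spec_rev_matrice; infer_instance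

-- ===== CLAIM (what is proved, stated in full; the proofs are below) =====
def Claim_equal_rev_matrice : Prop := ∀ (arr : List (List Int)), Dom_rev_matrice arr → Spec_rev_matrice arr (rev_matrice arr)

-- ===== LEMMAS AND PROOFS =====

-- A's second loop: starting at index i1 and walking a list of length i1+1, it emits ys.take (i1+1) back to front.
theorem pv_loop (ys : List (List Int)) :
    ∀ (xs : List (List Int)) (i1 : Nat) (acc : List (List Int)),
      xs.length = i1 + 1 → i1 < ys.length →
      List.foldl (fun (s : Int × List (List Int)) _r => (s.1 - 1, s.2 ++ [PySem.List.pyGetD ys s.1 []]))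
        ((i1 : Int), acc) xs
        = (-1, acc ++ (ys.take (i1 + 1)).reverse) := by
  intro xs
  induction xs with
  | nil => intro i1 acc h; simp at h
  | cons x xs ih =>
    intro i1 acc h hlt
    simp only [List.length_cons] at h
    simp only [List.foldl_cons]
    have hget : PySem.List.pyGetD ys (i1 : Int) [] = ys[i1] := by
      simp [PySem.List.pyGetD_natCast, List.getD_eq_getElem?_getD, List.getElem?_eq_getElem hlt]
    cases i1 with
    | zero =>
      have hx : xs = [] := by simpa using h
      subst hx
      rw [List.foldl_nil]
      simp only [Nat.cast_zero] at hget ⊢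
      rw [hget, List.take_add_one, List.getElem?_eq_getElem hlt]
      simp
    | succ j =>
      have hstate : ((j + 1 : Nat) : Int) - 1 = (j : Int) := by push_cast; ring
      rw [hstate, ih j _ (by omega) (by omega)]
      have htake : ys.take (j + 2) = ys.take (j + 1) ++ [ys[j + 1]] := by
        rw [List.take_add_one, List.getElem?_eq_getElem hlt]; rfl
      rw [hget]
      have h2 : List.take (j + 1 + 1) ys = List.take (j + 1) ys ++ [ys[j + 1]] := htake
      rw [Prod.mk.injEq]
      refine ⟨rfl, ?_⟩
      rw [h2, List.reverse_append]
      simp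

-- A's first loop builds the list of reversed rows.
theorem pv_rev_pass (arr : List (List Int)) :
    arr.foldl (fun acc r => acc ++ [(PySem.List.slice? r none none (-1)).getD []]) []
      = arr.map List.reverse := by
  induction arr using List.reverseRecOn with
  | nil => rfl
  | append_singleton xs x ih =>
    rw [List.foldl_append, ih]
    simp [PySem.List.slice?_none_none_neg_one]

-- A's second loop reverses its list.
theorem pv_second (zs : List (List Int)) :
    (List.foldl (fun (s : Int × List (List Int)) _r => (s.1 - 1, s.2 ++ [PySem.List.pyGetD zs s.1 []]))
        ((zs.length : Int) - 1, []) zs).2 = zs.reverse := by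
  cases zs with
  | nil => rfl
  | cons y ys =>
    have hlen : (y :: ys).length = ys.length + 1 := by simp
    have hloop := pv_loop (y :: ys) (y :: ys) ys.length [] hlen (by simp)
    have hc : (((y :: ys).length : Int)) - 1 = (ys.length : Int) := by
      rw [hlen]; push_cast; ring
    rw [hc, hloop]
    simp [List.take_of_length_le (le_of_eq hlen)]

-- B's inner prepend loop reverses a row.
theorem pv_inner (row : List Int) : ∀ acc : List Int,
    row.foldl (fun rev_row x => x :: rev_row) acc = row.reverse ++ acc := by
  induction row with
  | nil => intro acc; simp
  | cons x xs ih => intro acc; simp [ih]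

-- B's outer prepend loop: fold prepending f of each row = reversed map.
theorem pv_outer (arr : List (List Int)) : ∀ acc : List (List Int),
    arr.foldl (fun out row => (row.foldl (fun rev_row x => x :: rev_row) []) :: out) acc
      = (arr.map List.reverse).reverse ++ acc := by
  induction arr with
  | nil => intro acc; simp
  | cons r rs ih =>
    intro acc
    rw [List.foldl_cons, ih]
    simp [pv_inner]

-- ===== VERDICT (by name: the statement is the Claim_ definition above) =====
theorem rev_matrice_spec : Claim_equal_rev_matrice := by
  intro arr _
  unfold Spec_rev_matrice rev_matrice rev_matrice_alt
  rw [pv_rev_pass, pv_second, pv_outer]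
  simp
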